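-- pv_equiv track=rewrite | github.com/mantidproject/mantid | scripts/Muon/GUI/Common/contexts/fitting_contexts/fitting_context.py | _latest_unique_fits_in
-- ===== SOURCE A (Python) =====
-- def _latest_unique_fits_in(fits_history: list) -> list:
--     """Returns a list of fits which all have unique fit output workspaces, and are the most recent of their kind."""
--     if len(fits_history) == 0:
--         return fits_history
--
--     latest_fits = []
--     # Reversed because the fits at the end of the list are the most recently performed fits.
--     for fit in reversed(fits_history):
--         if fit not in latest_fits:
--             latest_fits.append(fit)
--     latest_fits.reverse()
--     return latest_fits
-- ===== SOURCE B (Python) =====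
-- def _latest_unique_fits_in(fits_history: list) -> list:
--     """Returns a list of fits which all have unique fit output workspaces, and are the most recent of their kind."""
--     # Keep an element only if it has no later occurrence: identical to
--     # "most recent of each kind", preserving the relative order of survivors.
--     return [fit for i, fit in enumerate(fits_history) if fit not in fits_history[i + 1:]]
-- ===== Notes on version B (the rewrite author's own statement) =====
-- stated objective: simpler
-- what changed: Replaces the reversed-scan-with-seen-accumulator-then-reverse with a single forward comprehension that keeps an element exactly when it has no later occurrence; no seen list and no reversals.
import Mathlib
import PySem

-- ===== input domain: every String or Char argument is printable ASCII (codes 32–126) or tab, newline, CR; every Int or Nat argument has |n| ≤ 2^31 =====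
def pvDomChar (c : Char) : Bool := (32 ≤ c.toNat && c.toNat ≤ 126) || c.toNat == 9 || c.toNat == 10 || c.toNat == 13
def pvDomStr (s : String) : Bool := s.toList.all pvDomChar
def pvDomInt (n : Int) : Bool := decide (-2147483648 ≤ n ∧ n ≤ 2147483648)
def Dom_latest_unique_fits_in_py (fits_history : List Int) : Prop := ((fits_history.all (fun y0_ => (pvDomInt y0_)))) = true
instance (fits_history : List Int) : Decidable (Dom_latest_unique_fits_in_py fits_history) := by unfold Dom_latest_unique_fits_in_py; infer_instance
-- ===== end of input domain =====

-- B replaces A's reversed pass with a 'seen' accumulator plus a final reverse by a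
-- single forward pass keeping each element exactly when it has no later occurrence (simpler).


-- ===== PORT A =====
-- the 'for fit in reversed(...)' loop with its 'latest_fits' accumulator (append keeps order)
def aLoop : List Int → List Int → List Int
  | [], acc => acc
  | x :: xs, acc => aLoop xs (if x ∈ acc then acc else acc ++ [x])

def latest_unique_fits_in_py (fits_history : List Int) : List Int :=
  if fits_history.length = 0 then fits_history
  else (aLoop fits_history.reverse []).reverse

-- ===== PORT B =====
-- the forward comprehension: keep fit iff fit ∉ fits_history[i+1:]
def bLoop : List Int → List Int
  | [] => []
  | x :: xs => if x ∈ xs then bLoop xs else x :: bLoop xs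

def latest_unique_fits_in_py_alt (fits_history : List Int) : List Int :=
  bLoop fits_history

-- ===== PRECONDITION & SPEC =====
def Spec_latest_unique_fits_in_py (fits_history : List Int) (out : List Int) : Prop := out = latest_unique_fits_in_py_alt fits_history
instance (fits_history : List Int) (out : List Int) : Decidable (Spec_latest_unique_fits_in_py fits_history out) := by unfold Spec_latest_unique_fits_in_py; infer_instance

-- ===== CLAIM (what is proved, stated in full; the proofs are below) =====
def Claim_equal_latest_unique_fits_in_py : Prop := ∀ (fits_history : List Int), Dom_latest_unique_fits_in_py fits_history → Spec_latest_unique_fits_in_py fits_history (latest_unique_fits_in_py fits_history)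

-- ===== LEMMAS AND PROOFS =====

theorem mem_bLoop (a : Int) : ∀ (l : List Int), a ∈ bLoop l ↔ a ∈ l := by
  intro l
  induction l with
  | nil => simp [bLoop]
  | cons x xs ih =>
    by_cases hx : x ∈ xs
    · simp [bLoop, hx, ih]
      intro rfl_h; rw [rfl_h]; exact hx
    · simp [bLoop, hx, ih]

theorem mem_aLoop (a : Int) : ∀ (ys acc : List Int), a ∈ aLoop ys acc ↔ a ∈ acc ∨ a ∈ ys := by
  intro ys
  induction ys with
  | nil => intro acc; simp [aLoop]
  | cons x xs ih =>
    intro acc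
    by_cases hx : x ∈ acc
    · simp only [aLoop, if_pos hx, ih, List.mem_cons]
      constructor
      · rintro (h | h)
        · exact Or.inl h
        · exact Or.inr (Or.inr h)
      · rintro (h | rfl | h)
        · exact Or.inl h
        · exact Or.inl hx
        · exact Or.inr h
    · simp only [aLoop, if_neg hx, ih, List.mem_append, List.mem_cons]
      tauto

theorem aLoop_append (x : Int) : ∀ (ys acc : List Int),
    aLoop (ys ++ [x]) acc = (if x ∈ aLoop ys acc then aLoop ys acc else aLoop ys acc ++ [x]) := by
  intro ys
  induction ys with
  | nil => intro acc; simp [aLoop]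
  | cons y zs ih => intro acc; simp [aLoop, ih]

theorem aLoop_rev_eq_bLoop_rev : ∀ (l : List Int), aLoop l.reverse [] = (bLoop l).reverse := by
  intro l
  induction l with
  | nil => rfl
  | cons x xs ih =>
    have hmem : (x ∈ aLoop xs.reverse []) ↔ x ∈ xs := by
      rw [mem_aLoop]; simp
    simp only [List.reverse_cons, aLoop_append, ih, bLoop]
    by_cases hx : x ∈ xs
    · simp [hx, (mem_bLoop x xs).mpr hx]
    · simp [hx, (not_iff_not.mpr (mem_bLoop x xs)).mpr hx]

-- ===== VERDICT (by name: the statement is the Claim_ definition above) =====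
theorem latest_unique_fits_in_py_spec : Claim_equal_latest_unique_fits_in_py := by
  intro l _
  show latest_unique_fits_in_py l = latest_unique_fits_in_py_alt l
  unfold latest_unique_fits_in_py latest_unique_fits_in_py_alt
  cases l with
  | nil => rfl
  | cons x xs =>
    have h := aLoop_rev_eq_bLoop_rev (x :: xs)
    simp only [List.reverse_cons] at h
    simp [h]
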